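-- pv_equiv track=rewrite | github.com/vhsw/CodeMasters_Tourney | Python 3/maxZeros.py | maxZeros
-- ===== SOURCE A (Python) =====
-- def maxZeros(n):
--     answer = 0
--     maxZeros = 0
--     for k in range(2, n + 1):
--         numZeros = 0
--         value = n
--         while value:
--             if value % k == 0:
--                 numZeros += 1
--             value //= k
--         if numZeros > maxZeros:
--             maxZeros = numZeros
--             answer = k
--     return answer
-- ===== SOURCE B (Python) =====
-- def maxZeros(n):
--     # Only bases k <= sqrt(n) can give two or more zero digits; for k > sqrt(n)
--     # the count is 1 iff k divides n.  If no base <= sqrt(n) yields a zero digit,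
--     # n has no divisor in [2, sqrt(n)], hence none in (sqrt(n), n) either, and
--     # the first (and best) base with a zero is n itself.
--     if n < 2:
--         return 0
--     s = 0
--     while (s + 1) * (s + 1) <= n:
--         s += 1
--     answer = 0
--     best = 0
--     for k in range(2, s + 1):
--         c = 0
--         v = n
--         while v:
--             if v % k == 0:
--                 c += 1
--             v //= k
--         if c > best:
--             best = c
--             answer = k
--     return answer if best >= 1 else n
-- ===== Notes on version B (the rewrite author's own statement) =====
-- stated objective: faster
-- what changed: B scans only bases up to isqrt(n) (the only bases that can yield >=2 zero digits) and handles the remaining bases by the number-theoretic fact that a base k>sqrt(n) gives exactly one zero iff k divides n, which reduces to returning n when no small base yields a zero; A scans every base 2..n.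
import Mathlib
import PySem

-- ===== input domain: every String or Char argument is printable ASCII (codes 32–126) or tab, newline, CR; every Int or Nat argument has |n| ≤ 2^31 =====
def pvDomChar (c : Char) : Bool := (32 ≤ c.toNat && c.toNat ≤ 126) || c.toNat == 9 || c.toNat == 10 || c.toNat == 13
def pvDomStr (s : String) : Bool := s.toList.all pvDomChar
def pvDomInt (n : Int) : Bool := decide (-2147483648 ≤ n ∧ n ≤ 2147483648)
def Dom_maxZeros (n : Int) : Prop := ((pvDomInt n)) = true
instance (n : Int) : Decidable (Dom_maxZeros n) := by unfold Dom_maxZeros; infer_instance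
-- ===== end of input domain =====

-- B is faster: it scans only bases ≤ isqrt(n) and settles all larger bases arithmetically.

-- ===== PORT A =====
-- inner 'while value: if value % k == 0: numZeros += 1; value //= k' loop
-- (identical in A and in B's Source B, so shared); fuel-guarded for totality only
def countZeros (k : Int) : Nat → Int → Int → Int
  | 0, _, acc => acc
  | f + 1, v, acc =>
    if v ≠ 0 then
      countZeros k f (PySem.Int.floordiv v k) (if PySem.Int.mod v k = 0 then acc + 1 else acc)
    else acc

def maxZeros (n : Int) : Int :=
  ((PySem.List.pyRange 2 (n + 1) 1).foldl
    (fun (st : Int × Int) k =>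
      let numZeros := countZeros k (n.toNat + 1) n 0
      if numZeros > st.2 then (k, numZeros) else st)
    ((0 : Int), (0 : Int))).1

-- ===== PORT B =====
-- 'while (s+1)*(s+1) <= n: s += 1' (fuel-guarded for totality only)
def isqrtAux (n : Int) : Nat → Int → Int
  | 0, s => s
  | f + 1, s => if (s + 1) * (s + 1) ≤ n then isqrtAux n f (s + 1) else s

def maxZeros_alt (n : Int) : Int :=
  if n < 2 then 0
  else
    let s := isqrtAux n n.toNat 0
    let r := (PySem.List.pyRange 2 (s + 1) 1).foldl
      (fun (st : Int × Int) k =>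
        let c := countZeros k (n.toNat + 1) n 0
        if c > st.2 then (k, c) else st)
      ((0 : Int), (0 : Int))
    if r.2 ≥ 1 then r.1 else n

-- ===== PRECONDITION & SPEC =====
def Spec_maxZeros (n : Int) (out : Int) : Prop := out = maxZeros_alt n
instance (n : Int) (out : Int) : Decidable (Spec_maxZeros n out) := by unfold Spec_maxZeros; infer_instance

-- ===== CLAIM (what is proved, stated in full; the proofs are below) =====
def Claim_equal_maxZeros : Prop := ∀ (n : Int), Dom_maxZeros n → Spec_maxZeros n (maxZeros n)

-- ===== LEMMAS AND PROOFS =====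

-- the count of one base, and the fold step, as the proofs speak about them
def cnt (n k : Int) : Int := countZeros k (n.toNat + 1) n 0
def step (n : Int) (st : Int × Int) (k : Int) : Int × Int :=
  if cnt n k > st.2 then (k, cnt n k) else st

lemma countZeros_zero (k : Int) (f : Nat) (acc : Int) : countZeros k (f + 1) 0 acc = acc := by
  simp [countZeros]

lemma countZeros_step (k : Int) (f : Nat) (v acc : Int) (h : v ≠ 0) :
    countZeros k (f + 1) v acc =
      countZeros k f (PySem.Int.floordiv v k) (if PySem.Int.mod v k = 0 then acc + 1 else acc) := by
  simp [countZeros, h]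

lemma countZeros_ge (k : Int) : ∀ (f : Nat) (v acc : Int), acc ≤ countZeros k f v acc := by
  intro f
  induction f with
  | zero => intro v acc; simp [countZeros]
  | succ f ih =>
    intro v acc
    by_cases h : v = 0
    · rw [h, countZeros_zero]
    · rw [countZeros_step k f v acc h]
      exact le_trans (by split <;> omega) (ih _ _)

lemma cnt_ge_one_of_dvd (n k : Int) (hn : 1 ≤ n) (hk : k ∣ n) : 1 ≤ cnt n k := by
  unfold cnt
  have h1 : PySem.Int.mod n k = 0 := (PySem.Int.mod_eq_zero_iff_dvd n k).2 hk
  rw [countZeros_step k n.toNat n 0 (by omega), h1, if_pos rfl]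
  simpa using countZeros_ge k n.toNat (PySem.Int.floordiv n k) 1

-- for a base k with sqrt(n) < k ≤ n the count is 1 iff k divides n
lemma cnt_large (n k : Int) (hk2 : 2 ≤ k) (hkn : k ≤ n) (hbig : n < k * k) :
    cnt n k = if k ∣ n then 1 else 0 := by
  have hn2 : 2 ≤ n := le_trans hk2 hkn
  have hkpos : (0 : Int) < k := by omega
  obtain ⟨f, hf⟩ : ∃ f, n.toNat = f + 2 := ⟨n.toNat - 2, by omega⟩
  have hfd : PySem.Int.floordiv n k = n / k := PySem.Int.floordiv_eq_ediv_of_pos hkpos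
  have hv1lo : 1 ≤ n / k := (Int.le_ediv_iff_mul_le hkpos).2 (by omega)
  have hv1hi : n / k < k := (Int.ediv_lt_iff_lt_mul (a := n) (b := k) (c := k) hkpos).2 hbig
  have hmod1 : PySem.Int.mod (n / k) k = n / k := by
    rw [PySem.Int.mod_eq_emod_of_pos hkpos]
    exact Int.emod_eq_of_lt (by omega) hv1hi
  have hdiv1 : PySem.Int.floordiv (n / k) k = 0 := by
    rw [PySem.Int.floordiv_eq_ediv_of_pos hkpos]
    exact Int.ediv_eq_zero_of_lt (by omega) hv1hi
  have hmodn : PySem.Int.mod n k = 0 ↔ k ∣ n := PySem.Int.mod_eq_zero_iff_dvd n k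
  unfold cnt
  rw [hf, show f + 2 + 1 = (f + 2) + 1 from rfl,
    countZeros_step k (f + 2) n 0 (by omega), hfd,
    show f + 2 = (f + 1) + 1 from rfl,
    countZeros_step k (f + 1) (n / k) _ (by omega), hmod1, if_neg (by omega), hdiv1,
    countZeros_zero]
  by_cases hd : k ∣ n
  · rw [if_pos (hmodn.2 hd), if_pos hd]; norm_num
  · rw [if_neg (fun h => hd (hmodn.1 h)), if_neg hd]

lemma foldl_step_id (n : Int) (l : List Int) (st : Int × Int)
    (h : ∀ k ∈ l, cnt n k ≤ st.2) : l.foldl (step n) st = st := by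
  induction l with
  | nil => rfl
  | cons a t ih =>
    have ha : step n st a = st := by
      unfold step; rw [if_neg (by have := h a (by simp); omega)]
    simp only [List.foldl_cons, ha]
    exact ih (fun k hk => h k (by simp [hk]))

lemma foldl_step_mono (n : Int) (l : List Int) :
    ∀ st : Int × Int, st.2 ≤ (l.foldl (step n) st).2 := by
  induction l with
  | nil => intro st; exact le_rfl
  | cons a t ih =>
    intro st
    refine le_trans ?_ (ih (step n st a))
    unfold step
    split
    · simp; omega
    · exact le_rfl

lemma foldl_step_mem_le (n : Int) (l : List Int) :
    ∀ (st : Int × Int) (k : Int), k ∈ l → cnt n k ≤ (l.foldl (step n) st).2 := by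
  induction l with
  | nil => intro _ _ h; simp at h
  | cons a t ih =>
    intro st k hk
    rcases List.mem_cons.1 hk with h | h
    · rw [h]
      refine le_trans ?_ (foldl_step_mono n t (step n st a))
      unfold step
      split
      · simp
      · omega
    · exact ih (step n st a) k h

lemma isqrtAux_spec (n : Int) : ∀ (f : Nat) (s : Int), 0 ≤ s → s * s ≤ n →
    n < (s + (f : Int) + 1) * (s + (f : Int) + 1) →
    0 ≤ isqrtAux n f s ∧ (isqrtAux n f s) * (isqrtAux n f s) ≤ n ∧
      n < (isqrtAux n f s + 1) * (isqrtAux n f s + 1) := by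
  intro f
  induction f with
  | zero =>
    intro s hs h1 h2
    simpa [isqrtAux] using ⟨hs, h1, by simpa using h2⟩
  | succ f ih =>
    intro s hs h1 h2
    simp only [isqrtAux]
    split
    · exact ih (s + 1) (by omega) (by assumption) (by push_cast at h2 ⊢; nlinarith [h2])
    · exact ⟨hs, h1, by omega⟩

-- ===== VERDICT (by name: the statement is the Claim_ definition above) =====
theorem maxZeros_spec : Claim_equal_maxZeros := by
  intro n _
  unfold Spec_maxZeros
  by_cases hn : n < 2
  · show (((PySem.List.pyRange 2 (n + 1) 1).foldl (step n) ((0 : Int), (0 : Int))).1) = _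
    unfold maxZeros_alt
    rw [if_pos hn, PySem.List.pyRange_one_eq_nil (by omega)]
    rfl
  · replace hn : 2 ≤ n := by omega
    obtain ⟨hs0, hslo, hshi⟩ := isqrtAux_spec n n.toNat 0 le_rfl (by omega)
      (by have h : ((n.toNat : Int)) = n := by omega
          rw [h]; nlinarith)
    set s := isqrtAux n n.toNat 0 with hs
    have hs1 : 1 ≤ s := by nlinarith
    have hsn : s ≤ n := le_trans (by nlinarith) hslo
    have hsn' : s + 1 ≤ n := by nlinarith
    set r := (PySem.List.pyRange 2 (s + 1) 1).foldl (step n) ((0 : Int), (0 : Int)) with hr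
    have hB : maxZeros_alt n = if r.2 ≥ 1 then r.1 else n := by
      unfold maxZeros_alt
      rw [if_neg (by omega)]
      rfl
    have hA : maxZeros n =
        ((PySem.List.pyRange (s + 1) (n + 1) 1).foldl (step n) r).1 := by
      show (((PySem.List.pyRange 2 (n + 1) 1).foldl (step n) ((0 : Int), (0 : Int))).1) = _
      rw [PySem.List.pyRange_one_append 2 (s + 1) (n + 1) (by omega) (by omega),
        List.foldl_append]
    rw [hA, hB]
    have hr2 : (0 : Int) ≤ r.2 := foldl_step_mono n _ _
    -- every base above s has count (if dvd then 1 else 0)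
    have hlarge : ∀ k : Int, s + 1 ≤ k → k ≤ n → cnt n k = if k ∣ n then 1 else 0 := by
      intro k h1 h2
      exact cnt_large n k (by omega) h2 (lt_of_lt_of_le hshi (by nlinarith))
    by_cases hbest : r.2 ≥ 1
    · rw [if_pos hbest]
      have h : (PySem.List.pyRange (s + 1) (n + 1) 1).foldl (step n) r = r := by
        apply foldl_step_id
        intro k hk
        rw [PySem.List.mem_pyRange_one] at hk
        rw [hlarge k hk.1 (by omega)]
        split <;> omega
      rw [h]
    · rw [if_neg hbest]
      have hr0 : r.2 = 0 := by omega
      -- no divisor of n in [2, s]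
      have hnosmall : ∀ k : Int, 2 ≤ k → k ≤ s → ¬ k ∣ n := by
        intro k h1 h2 hd
        have hc1 := cnt_ge_one_of_dvd n k (by omega) hd
        have hc2 := foldl_step_mem_le n (PySem.List.pyRange 2 (s + 1) 1)
          ((0 : Int), (0 : Int)) k (PySem.List.mem_pyRange_one.2 (by omega))
        rw [← hr] at hc2
        omega
      -- hence no divisor of n in (s, n)
      have hnomid : ∀ k : Int, s + 1 ≤ k → k < n → ¬ k ∣ n := by
        intro k h1 h2 hd
        obtain ⟨d, hdv⟩ := hd
        have hkpos : (0 : Int) < k := by omega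
        have hd1 : 1 ≤ d := by nlinarith
        have hdne : d ≠ 1 := by intro h; rw [h] at hdv; omega
        have hds : d ≤ s := by nlinarith
        exact hnosmall d (by omega) hds ⟨k, by rw [hdv]; ring⟩
      -- split the big range at n: all counts there are 0 until k = n, which has one zero
      rw [PySem.List.pyRange_one_append (s + 1) n (n + 1) (by omega) (by omega),
        List.foldl_append]
      have hmid : (PySem.List.pyRange (s + 1) n 1).foldl (step n) r = r := by
        apply foldl_step_id
        intro k hk
        rw [PySem.List.mem_pyRange_one] at hk
        rw [hlarge k hk.1 (by omega), if_neg (hnomid k hk.1 hk.2)]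
        omega
      rw [hmid, PySem.List.pyRange_one_singleton]
      have hcn : cnt n n = 1 := by
        rw [hlarge n (by omega) le_rfl, if_pos dvd_rfl]
      simp only [List.foldl_cons, List.foldl_nil, step, hcn, hr0]
      rw [if_pos (by omega)]
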